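-- pv_equiv track=rewrite | github.com/yiyayo-wqh/segflow | simulation/routing/segflow.py | connect_paths
-- ===== SOURCE A (Python) =====
-- def connect_paths(paths_a, paths_b):
-- 	connected_paths = []
--
-- 	# 遍历集合 A 中的路径
-- 	for path_a in paths_a:
-- 		end_node_a = path_a[-1]  # 获取路径 A 的最后一个节点
--
-- 		# 遍历集合 B 中的路径
-- 		for path_b in paths_b:
-- 			start_node_b = path_b[0]  # 获取路径 B 的第一个节点
--
-- 			# 如果路径 A 的最后一个节点与路径 B 的第一个节点相同
-- 			if end_node_a == start_node_b:
-- 				# 将路径 A 和路径 B 连接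
-- 				connected_path = path_a[:-1] + path_b
-- 				connected_paths.append(connected_path)
--
-- 	return connected_paths
-- ===== SOURCE B (Python) =====
-- def connect_paths(paths_a, paths_b):
--     # Index paths_b by their start node once, then look up each path_a's end node.
--     index = {}
--     for path_b in paths_b:
--         index.setdefault(path_b[0], []).append(path_b)
--
--     connected_paths = []
--     for path_a in paths_a:
--         for path_b in index.get(path_a[-1], []):
--             connected_paths.append(path_a[:-1] + path_b)
--     return connected_paths
-- ===== Notes on version B (the rewrite author's own statement) =====
-- stated objective: alternative
-- what changed: Replaced A's nested scan over paths_b for every path_a with a dict indexing paths_b by start node built once, then a single lookup per path_a; the comparison count drops from |A|*|B| to |A|+|B| though total work stays output-bound.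
-- outside the precondition, e.g. on connect_paths([], [[]]): A returns [], B raises IndexError
import Mathlib
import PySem

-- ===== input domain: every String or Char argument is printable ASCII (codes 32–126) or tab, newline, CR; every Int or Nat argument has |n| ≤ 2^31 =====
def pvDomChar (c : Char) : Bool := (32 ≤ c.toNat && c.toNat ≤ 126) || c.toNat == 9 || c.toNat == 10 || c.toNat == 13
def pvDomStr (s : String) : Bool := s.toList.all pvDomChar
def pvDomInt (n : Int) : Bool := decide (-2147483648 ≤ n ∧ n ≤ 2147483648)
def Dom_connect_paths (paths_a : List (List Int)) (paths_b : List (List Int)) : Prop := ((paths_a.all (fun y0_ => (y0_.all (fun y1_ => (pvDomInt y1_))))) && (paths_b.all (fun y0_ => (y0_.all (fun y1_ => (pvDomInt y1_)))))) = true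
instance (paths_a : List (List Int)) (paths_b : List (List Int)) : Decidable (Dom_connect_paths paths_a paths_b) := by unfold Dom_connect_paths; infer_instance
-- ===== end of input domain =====

-- B builds a dict indexing paths_b by start node once and does one lookup per path_a, instead of A's inner scan of paths_b for every path_a (alternative algorithm; measured running time is output-bound, not faster).

-- ===== PORT A =====
def connect_paths (paths_a : List (List Int)) (paths_b : List (List Int)) : List (List Int) :=
  paths_a.foldl (fun acc path_a =>
    match PySem.List.pyGet? path_a (-1) with        -- path_a[-1]; none = IndexError, outside Pre_
    | none => acc
    | some end_node_a =>
      paths_b.foldl (fun acc2 path_b =>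
        match PySem.List.pyGet? path_b 0 with      -- path_b[0]; none = IndexError, outside Pre_
        | none => acc2
        | some start_node_b =>
          if end_node_a == start_node_b then
            acc2 ++ [PySem.List.slice path_a none (some (-1)) ++ path_b]   -- path_a[:-1] + path_b
          else acc2) acc) []

-- ===== PORT B =====
def connect_paths_alt (paths_a : List (List Int)) (paths_b : List (List Int)) : List (List Int) :=
  let index : PySem.Dict Int (List (List Int)) :=
    paths_b.foldl (fun d path_b =>
      match PySem.List.pyGet? path_b 0 with        -- path_b[0]; none = IndexError, outside Pre_
      | none => d
      | some s => d.modify s [] (· ++ [path_b]))   -- index.setdefault(path_b[0], []).append(path_b)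
      PySem.Dict.empty
  paths_a.foldl (fun acc path_a =>
    match PySem.List.pyGet? path_a (-1) with       -- path_a[-1]; none = IndexError, outside Pre_
    | none => acc
    | some e => acc ++ (index.getD e []).map
        (fun path_b => PySem.List.slice path_a none (some (-1)) ++ path_b)) []

-- ===== PRECONDITION & SPEC =====
-- Pre_ excludes inputs containing an empty path: on them A raises IndexError, except in the corner
-- paths_a = [] with an empty path in paths_b, where A returns [] without ever reading paths_b but
-- B's up-front index build raises IndexError — that corner is excluded too.
def Pre_connect_paths (paths_a : List (List Int)) (paths_b : List (List Int)) : Prop :=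
  (∀ p ∈ paths_a, p ≠ []) ∧ (∀ p ∈ paths_b, p ≠ [])
instance (paths_a : List (List Int)) (paths_b : List (List Int)) : Decidable (Pre_connect_paths paths_a paths_b) := by unfold Pre_connect_paths; infer_instance

def pvWitness_connect_paths : List (List Int) × List (List Int) := ([[1, 2]], [[2, 3], [4, 5]])

def Spec_connect_paths (paths_a : List (List Int)) (paths_b : List (List Int)) (out : List (List Int)) : Prop := out = connect_paths_alt paths_a paths_b
instance (paths_a : List (List Int)) (paths_b : List (List Int)) (out : List (List Int)) : Decidable (Spec_connect_paths paths_a paths_b out) := by unfold Spec_connect_paths; infer_instance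

-- ===== CLAIM (what is proved, stated in full; the proofs are below) =====
def Claim_equal_connect_paths : Prop := ∀ (paths_a : List (List Int)) (paths_b : List (List Int)), Dom_connect_paths paths_a paths_b → Pre_connect_paths paths_a paths_b → Spec_connect_paths paths_a paths_b (connect_paths paths_a paths_b)

-- ===== LEMMAS AND PROOFS =====

-- The bucket of B's index at key e is exactly the paths of paths_b starting at e, in order.
theorem index_bucket (pb : List (List Int)) (hb : ∀ p ∈ pb, p ≠ []) (e : Int) :
    (pb.foldl (fun d path_b =>
        match PySem.List.pyGet? path_b 0 with
        | none => d
        | some s => d.modify s [] (· ++ [path_b])) PySem.Dict.empty).getD e []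
      = pb.filter (fun p => p.headI == e) := by
  have hcongr : pb.foldl (fun d path_b =>
        match PySem.List.pyGet? path_b 0 with
        | none => d
        | some s => d.modify s [] (· ++ [path_b])) PySem.Dict.empty
      = (pb.map (fun p => (p.headI, p))).foldl
          (fun d q => d.modify q.1 [] (· ++ [q.2])) PySem.Dict.empty := by
    rw [List.foldl_map]
    apply PySem.List.foldl_congr_mem
    intro d p hp
    obtain ⟨x, xs, rfl⟩ := List.exists_cons_of_ne_nil (hb p hp)
    simp
  rw [hcongr, PySem.Dict.getD_foldl_modify_append]
  simp [List.filter_map, Function.comp_def]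
-- ===== VERDICT (by name: the statement is the Claim_ definition above) =====

theorem connect_paths_spec : Claim_equal_connect_paths := by
  intro paths_a paths_b _ hpre
  obtain ⟨ha, hb⟩ := hpre
  unfold Spec_connect_paths connect_paths connect_paths_alt
  apply PySem.List.foldl_congr_mem
  intro acc p hp
  obtain ⟨x, xs, rfl⟩ := List.exists_cons_of_ne_nil (ha p hp)
  cases hget : PySem.List.pyGet? (x :: xs) (-1) with
  | none => rfl
  | some e =>
    have hinner : paths_b.foldl (fun acc2 path_b =>
          match PySem.List.pyGet? path_b 0 with
          | none => acc2
          | some s =>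
            if e == s then acc2 ++ [PySem.List.slice (x :: xs) none (some (-1)) ++ path_b]
            else acc2) acc
        = paths_b.foldl (fun acc2 path_b =>
            if path_b.headI == e then
              acc2 ++ [PySem.List.slice (x :: xs) none (some (-1)) ++ path_b]
            else acc2) acc := by
      apply PySem.List.foldl_congr_mem
      intro acc2 q hq
      obtain ⟨y, ys, rfl⟩ := List.exists_cons_of_ne_nil (hb q hq)
      simp only [PySem.List.pyGet?_zero_cons, List.headI]
      rw [BEq.comm]
      rfl
    simp only [hinner, PySem.List.foldl_append_if, index_bucket paths_b hb e]
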